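-- pv_equiv track=rewrite | github.com/HUST-NingKang-Lab/MicroSPECTRA | fourier_ts_generate.py | make_sample_ids
-- ===== SOURCE A (Python) =====
-- from typing import Dict, List, Optional, Tuple
--
-- def make_sample_ids(n_samples: int, base_m: int) -> List[str]:
--     base = [f"S{i}" for i in range(base_m)]
--     if n_samples <= base_m:
--         return base[:n_samples]
--     out: List[str] = []
--     times = n_samples // base_m
--     rem = n_samples % base_m
--     counter = 1
--     for _ in range(times):
--         for s in base:
--             out.append(f"{s}_syn{counter}")
--             counter += 1
--     for s in base[:rem]:
--         out.append(f"{s}_syn{counter}")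
--         counter += 1
--     return out
-- ===== SOURCE B (Python) =====
-- def make_sample_ids(n_samples: int, base_m: int) -> list:
--     if n_samples <= base_m:
--         return [f"S{i}" for i in range(n_samples)]
--     return [f"S{i % base_m}_syn{i + 1}" for i in range(n_samples)]
-- ===== Notes on version B (the rewrite author's own statement) =====
-- stated objective: simpler
-- what changed: Replaces A's prebuilt base list, nested repetition loops and running counter variable with a single comprehension using closed-form index arithmetic: the k-th id is f"S{k % base_m}_syn{k+1}".
-- outside the precondition, e.g. on make_sample_ids(-1, 3): A returns ['S0', 'S1'], B returns []; on make_sample_ids(2, -2): A returns [], B returns ['S0_syn1', 'S-1_syn2']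
import Mathlib
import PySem

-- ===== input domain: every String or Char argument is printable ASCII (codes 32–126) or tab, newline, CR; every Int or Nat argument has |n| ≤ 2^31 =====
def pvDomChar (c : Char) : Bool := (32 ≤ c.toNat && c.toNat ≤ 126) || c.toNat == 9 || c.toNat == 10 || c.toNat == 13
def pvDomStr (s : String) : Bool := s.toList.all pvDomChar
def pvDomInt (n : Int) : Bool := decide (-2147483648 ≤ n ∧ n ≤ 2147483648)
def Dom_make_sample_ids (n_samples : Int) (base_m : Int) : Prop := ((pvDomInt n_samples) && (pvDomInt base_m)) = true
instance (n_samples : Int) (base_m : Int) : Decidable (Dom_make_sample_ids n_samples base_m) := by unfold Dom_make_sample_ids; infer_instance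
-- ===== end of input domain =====

-- B replaces A's prebuilt base list, nested repetition loops and running counter by a single
-- comprehension using closed-form index arithmetic (k-th id is "S{k % base_m}_syn{k+1}"): simpler.

-- ===== PORT A =====
def make_sample_ids (n_samples : Int) (base_m : Int) : List String :=
  let base := (PySem.List.pyRange 0 base_m 1).map (fun i => "S" ++ PySem.Int.toStr i)
  if n_samples ≤ base_m then
    PySem.List.slice base none (some n_samples)
  else
    let times := PySem.Int.floordiv n_samples base_m
    let rem := PySem.Int.mod n_samples base_m
    let st1 : List String × Int :=
      (PySem.List.pyRange 0 times 1).foldl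
        (fun st _ =>
          base.foldl (fun st s => (st.1 ++ [s ++ "_syn" ++ PySem.Int.toStr st.2], st.2 + 1)) st)
        ([], 1)
    let st2 : List String × Int :=
      (PySem.List.slice base none (some rem)).foldl
        (fun st s => (st.1 ++ [s ++ "_syn" ++ PySem.Int.toStr st.2], st.2 + 1)) st1
    st2.1

-- ===== PORT B =====
def make_sample_ids_alt (n_samples : Int) (base_m : Int) : List String :=
  if n_samples ≤ base_m then
    (PySem.List.pyRange 0 n_samples 1).map (fun i => "S" ++ PySem.Int.toStr i)
  else
    (PySem.List.pyRange 0 n_samples 1).map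
      (fun i => "S" ++ PySem.Int.toStr (PySem.Int.mod i base_m) ++ "_syn" ++ PySem.Int.toStr (i + 1))

-- ===== PRECONDITION & SPEC =====
-- Pre_ excludes exactly the degenerate inputs where A raises ZeroDivisionError
-- (base_m = 0 < n_samples) or returns an accidental value of its implementation
-- (the negative-slice prefix base[:n_samples] for negative n_samples with base_m + n_samples > 0,
-- and the empty list produced by the empty base for 0 > base_m with n_samples > 0).
def Pre_make_sample_ids (n_samples : Int) (base_m : Int) : Prop :=
  (0 ≤ n_samples ∧ (1 ≤ base_m ∨ n_samples = 0)) ∨ (n_samples < 0 ∧ base_m + n_samples ≤ 0)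
instance (n_samples : Int) (base_m : Int) : Decidable (Pre_make_sample_ids n_samples base_m) := by
  unfold Pre_make_sample_ids; infer_instance

def pvWitness_make_sample_ids : Int × Int := (7, 3)

def Spec_make_sample_ids (n_samples : Int) (base_m : Int) (out : List String) : Prop := out = make_sample_ids_alt n_samples base_m
instance (n_samples : Int) (base_m : Int) (out : List String) : Decidable (Spec_make_sample_ids n_samples base_m out) := by unfold Spec_make_sample_ids; infer_instance

-- ===== CLAIM (what is proved, stated in full; the proofs are below) =====
def Claim_equal_make_sample_ids : Prop := ∀ (n_samples : Int) (base_m : Int), Dom_make_sample_ids n_samples base_m → Pre_make_sample_ids n_samples base_m → Spec_make_sample_ids n_samples base_m (make_sample_ids n_samples base_m)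

-- ===== LEMMAS AND PROOFS =====

-- the suffix-appending loop body, named for the lemmas below
def pvStep (st : List String × Int) (s : String) : List String × Int :=
  (st.1 ++ [s ++ "_syn" ++ PySem.Int.toStr st.2], st.2 + 1)

-- sequential emission: what one pass of the loop appends starting at counter c
def pvEmit : List String → Int → List String
  | [], _ => []
  | s :: l, c => (s ++ "_syn" ++ PySem.Int.toStr c) :: pvEmit l (c + 1)

lemma pvEmit_append (l₁ l₂ : List String) (c : Int) :
    pvEmit (l₁ ++ l₂) c = pvEmit l₁ c ++ pvEmit l₂ (c + l₁.length) := by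
  induction l₁ generalizing c with
  | nil => simp [pvEmit]
  | cons s l ih => simp [pvEmit, ih, add_assoc, add_comm 1 (l.length : Int)]

lemma foldl_pvStep (l : List String) (acc : List String) (c : Int) :
    l.foldl pvStep (acc, c) = (acc ++ pvEmit l c, c + l.length) := by
  induction l generalizing acc c with
  | nil => simp [pvEmit]
  | cons s l ih => simp [pvStep, pvEmit, ih, add_assoc, add_comm 1 (l.length : Int)]

lemma foldl_outer (L : List Int) (base acc : List String) (c : Int) :
    L.foldl (fun st _ => base.foldl pvStep st) (acc, c)
      = (acc ++ pvEmit ((List.replicate L.length base).flatten) c,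
         c + L.length * base.length) := by
  induction L generalizing acc c with
  | nil => simp [pvEmit]
  | cons x L ih =>
      simp only [List.foldl_cons, foldl_pvStep, ih, List.length_cons, List.replicate_succ,
        List.flatten_cons, pvEmit_append, List.append_assoc]
      refine Prod.ext rfl ?_
      push_cast; ring

lemma pvEmit_map_range (f : Nat → String) (N : Nat) (c : Int) :
    pvEmit ((List.range N).map f) c = (List.range N).map (fun k => f k ++ "_syn" ++ PySem.Int.toStr (c + k)) := by
  induction N with
  | zero => simp [pvEmit]
  | succ N ih => simp [List.range_succ, pvEmit_append, ih, pvEmit]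

lemma flatten_replicate_range (f : Nat → String) (T M : Nat) :
    (List.replicate T ((List.range M).map f)).flatten
      = (List.range (T * M)).map (fun k => f (k % M)) := by
  induction T with
  | zero => simp
  | succ T ih =>
      rw [List.replicate_succ', List.flatten_append, ih, Nat.succ_mul, List.range_add,
        List.map_append]
      simp only [List.flatten_cons, List.flatten_nil, List.append_nil, List.map_map]
      congr 1
      refine List.map_congr_left (fun j hj => ?_)
      have hjM : j < M := List.mem_range.mp hj
      simp [Nat.mod_eq_of_lt hjM]

-- ===== VERDICT (by name: the statement is the Claim_ definition above) =====
lemma floordiv_zero_left (m : Int) : PySem.Int.floordiv 0 m = 0 := by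
  simp [PySem.Int.floordiv]

lemma mod_zero_left (m : Int) : PySem.Int.mod 0 m = 0 := by
  simp [PySem.Int.mod]

theorem make_sample_ids_spec : Claim_equal_make_sample_ids := by
  intro n m _dom hpre
  unfold Spec_make_sample_ids make_sample_ids make_sample_ids_alt
  rcases Or.symm hpre with ⟨hn, hnm⟩ | ⟨hn, hm⟩
  case _ =>
    by_cases hcase : n ≤ m
    · -- n < 0 and base_m + n ≤ 0, n ≤ m: both sides empty
      simp only [if_pos hcase]
      have hk : 0 < (-n).toNat := by omega
      have hneg : (some n : Option Int) = some (-(((-n).toNat : Nat) : Int)) := by congr 1; omega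
      rw [hneg, PySem.List.slice_to_neg_natCast _ _ hk]
      have hlen : ((PySem.List.pyRange 0 m).map (fun i => "S" ++ PySem.Int.toStr i)).length = (m - 0).toNat := by
        rw [List.length_map, PySem.List.length_pyRange_one]
      rw [hlen, show (m - 0).toNat - (-n).toNat = 0 from by omega, List.take_zero]
      rw [PySem.List.pyRange_one]
      rw [show (n - 0).toNat = 0 from by omega]
      simp
    · -- m < n < 0: the base list is empty, both sides empty
      simp only [if_neg hcase]
      have hbase : PySem.List.pyRange 0 m = [] := by
        rw [PySem.List.pyRange_one, show (m - 0).toNat = 0 from by omega]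
        simp
      rw [hbase]
      simp only [List.map_nil]
      rw [show (fun (st : List String × Int) (s : String) => (st.1 ++ [s ++ "_syn" ++ PySem.Int.toStr st.2], st.2 + 1)) = pvStep from rfl]
      rw [foldl_outer]
      simp only [List.flatten_replicate_nil]
      rw [PySem.List.pyRange_one (0 : Int) n, show (n - 0).toNat = 0 from by omega]
      simp [pvEmit, PySem.List.slice]
  case _ =>
  by_cases hcase : n ≤ m
  · -- small case: a prefix of the base list
    simp only [if_pos hcase]
    rw [PySem.List.slice_to _ hn, PySem.List.pyRange_one, PySem.List.pyRange_one]
    simp only [Int.sub_zero, List.map_map]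
    rw [← List.map_take, List.take_range]
    have hmin : min n.toNat m.toNat = n.toNat := by omega
    rw [hmin]
  · -- large case
    simp only [if_neg hcase]
    rcases hm with hm | hm
    · -- 1 ≤ m < n
      have hN : n = ((n.toNat : Nat) : Int) := (Int.toNat_of_nonneg hn).symm
      have hM : m = ((m.toNat : Nat) : Int) := (Int.toNat_of_nonneg (by omega)).symm
      set N := n.toNat with hNdef
      set M := m.toNat with hMdef
      have hM1 : 1 ≤ M := by omega
      rw [hN, hM]
      rw [PySem.Int.floordiv_natCast, PySem.Int.mod_natCast]
      rw [show (fun (st : List String × Int) (s : String) => (st.1 ++ [s ++ "_syn" ++ PySem.Int.toStr st.2], st.2 + 1)) = pvStep from rfl]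
      rw [PySem.List.pyRange_one, PySem.List.pyRange_one, PySem.List.pyRange_one]
      simp only [Int.sub_zero, Int.toNat_natCast, List.map_map, Function.comp_def, zero_add]
      rw [foldl_outer]
      simp only [List.length_map, List.length_range, List.nil_append]
      rw [PySem.List.slice_to_natCast, foldl_pvStep]
      simp only []
      rw [flatten_replicate_range (fun k => "S" ++ PySem.Int.toStr (k : Int))]
      rw [← List.map_take, List.take_range]
      have hRM : N % M < M := Nat.mod_lt _ (by omega)
      have hmin : min (N % M) M = N % M := by omega
      rw [hmin]
      have htake : (List.range (N % M)).map (fun (k : Nat) => "S" ++ PySem.Int.toStr (k : Int))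
          = (List.range (N % M)).map ((fun k => "S" ++ PySem.Int.toStr ((k % M : Nat) : Int)) ∘ (fun j => N / M * M + j)) := by
        refine List.map_congr_left (fun j hj => ?_)
        have hjR : j < N % M := List.mem_range.mp hj
        simp [Function.comp, Nat.mod_eq_of_lt (lt_of_lt_of_le hjR (Nat.le_of_lt hRM))]
      rw [htake, ← List.map_map]
      have hc : (1 : Int) + ((N / M : Nat) : Int) * ((M : Nat) : Int)
          = 1 + (((List.range (N / M * M)).map (fun (k : Nat) => "S" ++ PySem.Int.toStr ((k % M : Nat) : Int))).length : Int) := by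
        simp
      rw [hc, ← pvEmit_append, ← List.map_append, ← List.range_add]
      have hNsplit : N / M * M + N % M = N := by rw [Nat.mul_comm]; exact Nat.div_add_mod N M
      rw [hNsplit, pvEmit_map_range]
      refine List.map_congr_left (fun k _ => ?_)
      rw [PySem.Int.mod_natCast]
      have : (1 : Int) + (k : Int) = (k : Int) + 1 := by ring
      rw [this]
    · -- n = 0 and m < 0: both branches are empty
      subst hm
      rw [floordiv_zero_left m, mod_zero_left m]
      simp [PySem.List.pyRange_one, PySem.List.slice_to]
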